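-- pv_equiv track=rewrite | github.com/Netflix/e2nest | nest_site/nest/helpers.py | my_argmin
-- ===== SOURCE A (Python) =====
-- from typing import List, Optional
--
-- def my_argmin(a: List[int], shortlist: Optional[List[int]] = None):
--     """
--     My argmin implementation: return a list of indices chosen from the shortlist
--     with the minimum value from a. If shortlist is None, use all indices.
--
--     >>> my_argmin([1, 1, 2, 4])
--     [0, 1]
--     >>> my_argmin([3, 1, 2, 1])
--     [1, 3]
--     >>> my_argmin([1, 1, 2, 4], [0, 1, 3])
--     [0, 1]
--     >>> my_argmin([1, 1, 2, 4], [1, 2, 3])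
--     [1]
--     >>> my_argmin([1, 1, 2, 4], [2, 3])
--     [2]
--     >>> my_argmin([1, 1, 2, 4], [0, 2, 3])
--     [0]
--     >>> my_argmin([1, 1, 2, 4], [])
--     []
--     """
--     argmin = list()
--     minval = None
--     for i, e in enumerate(a):
--         if shortlist is None or i in shortlist:
--             if minval is None:
--                 minval = e
--                 argmin.append(i)
--             else:
--                 if e == minval:
--                     argmin.append(i)
--                 elif e < minval:
--                     minval = e
--                     argmin = [i]
--                 else:
--                     pass
--     return argmin
-- ===== SOURCE B (Python) =====
-- from typing import List, Optional
--
-- def my_argmin(a: List[int], shortlist: Optional[List[int]] = None):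
--     eligible = [(i, e) for i, e in enumerate(a) if shortlist is None or i in shortlist]
--     if not eligible:
--         return []
--     minval = min(e for _, e in eligible)
--     return [i for i, e in eligible if e == minval]
-- ===== Notes on version B (the rewrite author's own statement) =====
-- stated objective: simpler
-- what changed: Replaced A's single running-min pass with reset-on-new-min state by a two-pass decomposition: filter the eligible (index, value) pairs once, take the minimum value, then keep the indices attaining it.
import Mathlib
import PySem

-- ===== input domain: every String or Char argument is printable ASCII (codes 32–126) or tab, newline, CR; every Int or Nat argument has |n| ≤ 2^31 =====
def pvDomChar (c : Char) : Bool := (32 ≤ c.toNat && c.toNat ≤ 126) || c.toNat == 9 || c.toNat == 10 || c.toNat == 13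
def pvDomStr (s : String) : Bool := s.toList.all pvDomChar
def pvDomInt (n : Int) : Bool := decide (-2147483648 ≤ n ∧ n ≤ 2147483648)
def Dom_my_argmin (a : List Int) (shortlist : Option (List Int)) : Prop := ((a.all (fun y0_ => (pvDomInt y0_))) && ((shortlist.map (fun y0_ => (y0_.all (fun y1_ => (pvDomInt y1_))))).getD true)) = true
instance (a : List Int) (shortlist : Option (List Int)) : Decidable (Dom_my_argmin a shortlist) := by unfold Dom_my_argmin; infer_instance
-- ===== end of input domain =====

-- B replaces A's single running-min-and-reset pass by a two-pass decomposition
-- (filter eligible pairs, take the minimum value, keep indices attaining it); objective: simpler.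

-- shared helper: "shortlist is None or i in shortlist"
def pvElig (shortlist : Option (List Int)) (i : Int) : Bool :=
  match shortlist with
  | none => true
  | some l => l.contains i

-- ===== PORT A =====
-- A's loop body over one enumerated element, state = (argmin, minval)
def pvStepA (shortlist : Option (List Int)) (st : List Int × Option Int) (p : Int × Int) :
    List Int × Option Int :=
  if pvElig shortlist p.1 then
    match st.2 with
    | none => (st.1 ++ [p.1], some p.2)
    | some m =>
      if p.2 = m then (st.1 ++ [p.1], some m)
      else if p.2 < m then ([p.1], some p.2)
      else st
  else st

def my_argmin (a : List Int) (shortlist : Option (List Int)) : List Int :=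
  ((PySem.List.enumerate a).foldl (pvStepA shortlist) ([], none)).1

-- ===== PORT B =====
def my_argmin_alt (a : List Int) (shortlist : Option (List Int)) : List Int :=
  let eligible := (PySem.List.enumerate a).filter (fun p => pvElig shortlist p.1)
  match eligible with
  | [] => []
  | (i, e) :: rest =>
    -- min over the nonempty generator of eligible values
    let minval := rest.foldl (fun x p => min x p.2) e
    (((i, e) :: rest).filter (fun p => p.2 = minval)).map (·.1)

-- ===== PRECONDITION & SPEC =====
def Spec_my_argmin (a : List Int) (shortlist : Option (List Int)) (out : List Int) : Prop := out = my_argmin_alt a shortlist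
instance (a : List Int) (shortlist : Option (List Int)) (out : List Int) : Decidable (Spec_my_argmin a shortlist out) := by unfold Spec_my_argmin; infer_instance

-- ===== CLAIM (what is proved, stated in full; the proofs are below) =====
def Claim_equal_my_argmin : Prop := ∀ (a : List Int) (shortlist : Option (List Int)), Dom_my_argmin a shortlist → Spec_my_argmin a shortlist (my_argmin a shortlist)

-- ===== LEMMAS AND PROOFS =====

-- A's fold skips ineligible pairs: it equals the eligibility-free step folded over the filtered pairs
def pvStepA' (st : List Int × Option Int) (p : Int × Int) : List Int × Option Int :=
  match st.2 with
  | none => (st.1 ++ [p.1], some p.2)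
  | some m =>
    if p.2 = m then (st.1 ++ [p.1], some m)
    else if p.2 < m then ([p.1], some p.2)
    else st

theorem foldl_stepA_filter (shortlist : Option (List Int)) (l : List (Int × Int))
    (st : List Int × Option Int) :
    l.foldl (pvStepA shortlist) st = (l.filter (fun p => pvElig shortlist p.1)).foldl pvStepA' st := by
  induction l generalizing st with
  | nil => rfl
  | cons p l ih =>
    by_cases h : pvElig shortlist p.1 = true
    · simp [h, List.foldl_cons, pvStepA, pvStepA', ih]
    · simp only [Bool.not_eq_true] at h
      simp [h, List.foldl_cons, pvStepA, ih]

-- characterization of A's loop after the first eligible element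
theorem foldl_min_le (l : List (Int × Int)) (m : Int) :
    l.foldl (fun x p => min x p.2) m ≤ m := by
  induction l generalizing m with
  | nil => simp
  | cons q l ih => simpa using le_trans (ih (min m q.2)) (min_le_left _ _)

-- characterization of A's loop after the first eligible element
theorem foldl_stepA'_some (l : List (Int × Int)) (acc : List Int) (m : Int) :
    l.foldl pvStepA' (acc, some m) =
      ((if l.foldl (fun x p => min x p.2) m = m then acc else []) ++
        (l.filter (fun p => p.2 = l.foldl (fun x p => min x p.2) m)).map (·.1),
       some (l.foldl (fun x p => min x p.2) m)) := by
  induction l generalizing acc m with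
  | nil => simp
  | cons p l ih =>
    obtain ⟨i, v⟩ := p
    rcases lt_trichotomy v m with h | h | h
    · -- new strict minimum: reset
      have hne : v ≠ m := ne_of_lt h
      simp only [List.foldl_cons, pvStepA', hne, if_false, h, if_true]
      rw [ih]
      have hm' : min m v = v := min_eq_right h.le
      simp only [hm']
      have hle := foldl_min_le l v
      have hne2 : l.foldl (fun x p => min x p.2) v ≠ m := by
        intro hc; rw [hc] at hle; exact absurd hle (not_le.mpr h)
      simp only [if_neg hne2, List.filter_cons, List.nil_append]
      by_cases he : l.foldl (fun x p => min x p.2) v = v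
      · simp only [he]
        simp
      · have h2 : ¬ (v = l.foldl (fun x p => min x p.2) v) := fun hc => he hc.symm
        simp [if_neg he, h2]
    · -- equal to the running minimum: append
      subst h
      simp only [List.foldl_cons, pvStepA', if_true]
      rw [ih]
      simp only [min_self]
      by_cases he : l.foldl (fun x p => min x p.2) v = v
      · simp only [he, List.filter_cons]
        simp
      · have h2 : ¬ (v = l.foldl (fun x p => min x p.2) v) := fun hc => he hc.symm
        simp [if_neg he, h2]
    · -- larger: skip
      have hne : v ≠ m := ne_of_gt h
      have hnl : ¬ v < m := not_lt.mpr h.le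
      simp only [List.foldl_cons, pvStepA', hne, if_false, hnl]
      rw [ih]
      have hm' : min m v = m := min_eq_left h.le
      simp only [hm']
      have hle := foldl_min_le l m
      have h2 : ¬ (v = l.foldl (fun x p => min x p.2) m) := by
        intro hc; rw [← hc] at hle; exact absurd hle (not_le.mpr h)
      simp [h2]

-- ===== VERDICT (by name: the statement is the Claim_ definition above) =====
theorem my_argmin_spec : Claim_equal_my_argmin := by
  intro a shortlist _
  unfold Spec_my_argmin my_argmin my_argmin_alt
  rw [foldl_stepA_filter]
  cases hf : (PySem.List.enumerate a).filter (fun p => pvElig shortlist p.1) with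
  | nil => rfl
  | cons p rest =>
    obtain ⟨i, v⟩ := p
    simp only [List.foldl_cons, pvStepA', List.nil_append]
    rw [foldl_stepA'_some]
    by_cases he : rest.foldl (fun x p => min x p.2) v = v
    · simp only [he]
      simp
    · have h2 : ¬ (v = rest.foldl (fun x p => min x p.2) v) := fun hc => he hc.symm
      simp [if_neg he, h2]
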